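-- pv_equiv track=rewrite | github.com/SethPate/AdventOfCode | Day09/sethsolution9.py | cleanGarbage
-- ===== SOURCE A (Python) =====
-- def cleanGarbage(l):
--     """input: a list of single characters
--     output: a list with 'garbage' terms stripped out, anything enclosed in <>
--     """
--     outputList = []
--     isGarbage = False
--     for i in l:
--         if i == "<" and not isGarbage:
--             isGarbage = True
--         elif i == ">":
--             isGarbage = False
--         elif not isGarbage:
--             outputList.extend(i)
--     return outputList
-- ===== SOURCE B (Python) =====
-- def cleanGarbage(l):
--     """input: a list of single characters
--     output: a list with 'garbage' terms stripped out, anything enclosed in <>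
--     """
--     out = []
--     i = 0
--     n = len(l)
--     while i < n:
--         if l[i] == "<":
--             i += 1
--             while i < n and l[i] != ">":
--                 i += 1
--             i += 1  # skip the closing '>'
--         elif l[i] == ">":
--             i += 1  # stray '>' outside garbage is dropped
--         else:
--             out.extend(l[i])
--             i += 1
--     return out
-- ===== Notes on version B (the rewrite author's own statement) =====
-- stated objective: alternative
-- what changed: Replaces the boolean isGarbage state flag of A's single for-loop with an index cursor and a nested inner while-loop that scans ahead past each garbage section.
import Mathlib
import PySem

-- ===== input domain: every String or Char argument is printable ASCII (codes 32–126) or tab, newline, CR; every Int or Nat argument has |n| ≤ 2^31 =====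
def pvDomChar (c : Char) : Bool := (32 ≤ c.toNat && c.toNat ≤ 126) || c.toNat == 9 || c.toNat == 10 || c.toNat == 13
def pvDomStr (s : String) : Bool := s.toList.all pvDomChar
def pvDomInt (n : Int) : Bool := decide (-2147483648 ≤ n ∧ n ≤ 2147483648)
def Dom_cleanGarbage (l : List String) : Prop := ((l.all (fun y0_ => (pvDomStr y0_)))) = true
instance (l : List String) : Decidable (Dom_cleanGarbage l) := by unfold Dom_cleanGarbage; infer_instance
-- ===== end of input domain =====

-- B replaces A's boolean garbage flag by an index cursor with a nested scan-ahead loop; same cost, different decomposition.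

-- ===== PORT A =====
-- outputList.extend(i): a Python str iterates into its single-character strings
def pvChars (s : String) : List String := s.toList.map (fun c => String.ofList [c])

def cleanGarbage (l : List String) : List String :=
  (l.foldl (fun (st : List String × Bool) i =>
      if i = "<" ∧ st.2 = false then (st.1, true)
      else if i = ">" then (st.1, false)
      else if st.2 = false then (st.1 ++ pvChars i, st.2)
      else st)
    ([], false)).1

-- ===== PORT B =====
-- inner while loop of Source B: drop elements up to and including the first ">"
def skipGarbage : List String → List String
  | [] => []
  | s :: rest => if s = ">" then rest else skipGarbage rest

theorem skipGarbage_length_le (l : List String) : (skipGarbage l).length ≤ l.length := by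
  induction l with
  | nil => simp [skipGarbage]
  | cons a t ih =>
    simp only [skipGarbage]
    split
    · simp
    · exact Nat.le_succ_of_le ih

-- outer while loop of Source B (cursor advancing through the list)
def altGo : List String → List String
  | [] => []
  | s :: rest =>
    if s = "<" then altGo (skipGarbage rest)
    else if s = ">" then altGo rest
    else pvChars s ++ altGo rest
termination_by l => l.length
decreasing_by
  all_goals simp only [List.length_cons]
  · exact Nat.lt_succ_of_le (skipGarbage_length_le rest)
  · omega
  · omega

def cleanGarbage_alt (l : List String) : List String := altGo l

-- ===== PRECONDITION & SPEC =====
def Spec_cleanGarbage (l : List String) (out : List String) : Prop := out = cleanGarbage_alt l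
instance (l : List String) (out : List String) : Decidable (Spec_cleanGarbage l out) := by unfold Spec_cleanGarbage; infer_instance

-- ===== CLAIM (what is proved, stated in full; the proofs are below) =====
def Claim_equal_cleanGarbage : Prop := ∀ (l : List String), Dom_cleanGarbage l → Spec_cleanGarbage l (cleanGarbage l)

-- ===== LEMMAS AND PROOFS =====
def pvStep (st : List String × Bool) (i : String) : List String × Bool :=
  if i = "<" ∧ st.2 = false then (st.1, true)
  else if i = ">" then (st.1, false)
  else if st.2 = false then (st.1 ++ pvChars i, st.2)
  else st

theorem pv_loop_eq (l : List String) :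
    (∀ acc, (l.foldl pvStep (acc, false)).1 = acc ++ altGo l) ∧
    (∀ acc, (l.foldl pvStep (acc, true)).1 = acc ++ altGo (skipGarbage l)) := by
  induction l with
  | nil => simp [altGo, skipGarbage]
  | cons s rest ih =>
    constructor
    · intro acc
      by_cases h1 : s = "<"
      · simp [List.foldl_cons, pvStep, h1, ih.2, altGo]
      · by_cases h2 : s = ">"
        · simp [List.foldl_cons, pvStep, h2, ih.1, altGo]
        · simp [List.foldl_cons, pvStep, h1, h2, ih.1, altGo]
    · intro acc
      by_cases h2 : s = ">"
      · simp [List.foldl_cons, pvStep, h2, ih.1, skipGarbage]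
      · simp [List.foldl_cons, pvStep, h2, ih.2, skipGarbage]

-- ===== VERDICT (by name: the statement is the Claim_ definition above) =====
theorem cleanGarbage_spec : Claim_equal_cleanGarbage := by
  intro l _
  show cleanGarbage l = cleanGarbage_alt l
  have h := (pv_loop_eq l).1 []
  simpa [cleanGarbage, cleanGarbage_alt, pvStep] using h
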